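-- pv_equiv track=rewrite | github.com/apache/nuttx | tools/stackusage.py | reason_marker
-- ===== SOURCE A (Python) =====
-- def reason_marker(reasons):
--     """Return a single-char marker for uncertainty.
--
--     Marker priority (highest first):
--       ? = no DWARF data
--       * = dynamic stack (alloca/VLA)
--       @ = recursion
--       ^ = indirect call (function pointer)
--     """
--
--     for reason in reasons:
--         if reason == "no DWARF data":
--             return "?"
--     for reason in reasons:
--         if reason.startswith("dynamic stack"):
--             return "*"
--     for reason in reasons:
--         if reason.startswith("recursion:"):
--             return "@"
--     for reason in reasons:
--         if reason == "indirect call (function pointer)":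
--             return "^"
--     return ""
-- ===== SOURCE B (Python) =====
-- def reason_marker(reasons):
--     """Return a single-char marker for uncertainty.
--
--     Single pass: rank each reason (?=0, *=1, @=2, ^=3, none=4),
--     keep the best (smallest) rank, then map it back to a marker.
--     """
--     markers = ["?", "*", "@", "^", ""]
--     best = 4
--     for reason in reasons:
--         if reason == "no DWARF data":
--             rank = 0
--         elif reason.startswith("dynamic stack"):
--             rank = 1
--         elif reason.startswith("recursion:"):
--             rank = 2
--         elif reason == "indirect call (function pointer)":
--             rank = 3
--         else:
--             rank = 4
--         if rank < best:
--             best = rank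
--     return markers[best]
-- ===== Notes on version B (the rewrite author's own statement) =====
-- stated objective: simpler
-- what changed: Replaces A's four sequential scans of the list with a single pass that ranks each reason by marker priority and keeps the minimum rank, mapping it to the marker at the end.
import Mathlib
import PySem

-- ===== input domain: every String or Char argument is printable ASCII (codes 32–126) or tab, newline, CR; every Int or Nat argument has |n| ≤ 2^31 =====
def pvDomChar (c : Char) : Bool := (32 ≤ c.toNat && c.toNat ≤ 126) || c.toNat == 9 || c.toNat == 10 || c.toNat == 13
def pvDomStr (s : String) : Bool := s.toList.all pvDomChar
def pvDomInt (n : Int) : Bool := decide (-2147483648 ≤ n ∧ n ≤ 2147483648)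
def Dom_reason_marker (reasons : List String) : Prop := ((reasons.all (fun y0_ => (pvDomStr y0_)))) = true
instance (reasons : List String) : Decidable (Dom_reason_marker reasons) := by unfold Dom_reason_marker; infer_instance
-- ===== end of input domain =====

-- B replaces A's four sequential scans by one pass tracking the minimum priority rank (simpler).

-- ===== PORT A =====
-- fourth loop: indirect call
def pvLoop4 : List String → String
  | [] => ""
  | r :: rs => if r == "indirect call (function pointer)" then "^" else pvLoop4 rs

-- third loop: recursion
def pvLoop3 (all : List String) : List String → String
  | [] => pvLoop4 all
  | r :: rs => if PySem.Str.startswith r "recursion:" then "@" else pvLoop3 all rs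

-- second loop: dynamic stack
def pvLoop2 (all : List String) : List String → String
  | [] => pvLoop3 all all
  | r :: rs => if PySem.Str.startswith r "dynamic stack" then "*" else pvLoop2 all rs

-- first loop: no DWARF data
def pvLoop1 (all : List String) : List String → String
  | [] => pvLoop2 all all
  | r :: rs => if r == "no DWARF data" then "?" else pvLoop1 all rs

def reason_marker (reasons : List String) : String := pvLoop1 reasons reasons

-- ===== PORT B =====
-- rank of one reason: priority index of the marker it matches, 4 if none
def pvRank (r : String) : Nat :=
  if r == "no DWARF data" then 0
  else if PySem.Str.startswith r "dynamic stack" then 1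
  else if PySem.Str.startswith r "recursion:" then 2
  else if r == "indirect call (function pointer)" then 3
  else 4

def reason_marker_alt (reasons : List String) : String :=
  (["?", "*", "@", "^", ""]).getD
    (reasons.foldl (fun best r => if pvRank r < best then pvRank r else best) 4) ""

-- ===== PRECONDITION & SPEC =====
def Spec_reason_marker (reasons : List String) (out : String) : Prop := out = reason_marker_alt reasons
instance (reasons : List String) (out : String) : Decidable (Spec_reason_marker reasons out) := by unfold Spec_reason_marker; infer_instance

-- ===== CLAIM (what is proved, stated in full; the proofs are below) =====
def Claim_equal_reason_marker : Prop := ∀ (reasons : List String), Dom_reason_marker reasons → Spec_reason_marker reasons (reason_marker reasons)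

-- ===== LEMMAS AND PROOFS =====

theorem pvLoop4_eq (l : List String) :
    pvLoop4 l = if l.any (fun r => r == "indirect call (function pointer)") then "^" else "" := by
  induction l with
  | nil => rfl
  | cons a l ih => simp only [pvLoop4, List.any_cons, Bool.or_eq_true]; split_ifs <;> simp_all

theorem pvLoop3_eq (all l : List String) :
    pvLoop3 all l = if l.any (fun r => PySem.Str.startswith r "recursion:") then "@" else pvLoop4 all := by
  induction l with
  | nil => rfl
  | cons a l ih => simp only [pvLoop3, List.any_cons, Bool.or_eq_true]; split_ifs <;> simp_all

theorem pvLoop2_eq (all l : List String) :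
    pvLoop2 all l = if l.any (fun r => PySem.Str.startswith r "dynamic stack") then "*" else pvLoop3 all all := by
  induction l with
  | nil => rfl
  | cons a l ih => simp only [pvLoop2, List.any_cons, Bool.or_eq_true]; split_ifs <;> simp_all

theorem pvLoop1_eq (all l : List String) :
    pvLoop1 all l = if l.any (fun r => r == "no DWARF data") then "?" else pvLoop2 all all := by
  induction l with
  | nil => rfl
  | cons a l ih => simp only [pvLoop1, List.any_cons, Bool.or_eq_true]; split_ifs <;> simp_all

-- rank bounds from each condition
theorem pvRank_le4 (r : String) : pvRank r ≤ 4 := by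
  unfold pvRank; split_ifs <;> omega

theorem pvRank_of_c0 {r : String} (h : (r == "no DWARF data") = true) : pvRank r = 0 := by
  rw [beq_iff_eq] at h; subst h; decide

theorem pvRank_of_c1 {r : String} (h : PySem.Str.startswith r "dynamic stack" = true) : pvRank r ≤ 1 := by
  unfold pvRank; split_ifs <;> simp_all

theorem pvRank_of_c2 {r : String} (h : PySem.Str.startswith r "recursion:" = true) : pvRank r ≤ 2 := by
  unfold pvRank; split_ifs <;> simp_all

theorem pvRank_of_c3 {r : String} (h : (r == "indirect call (function pointer)") = true) : pvRank r ≤ 3 := by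
  rw [beq_iff_eq] at h; subst h; decide

-- rank inversions
theorem pvRank_eq0 {r : String} (h : pvRank r = 0) : (r == "no DWARF data") = true := by
  unfold pvRank at h; split_ifs at h <;> simp_all

theorem pvRank_eq1 {r : String} (h : pvRank r = 1) : PySem.Str.startswith r "dynamic stack" = true := by
  unfold pvRank at h; split_ifs at h <;> simp_all

theorem pvRank_eq2 {r : String} (h : pvRank r = 2) : PySem.Str.startswith r "recursion:" = true := by
  unfold pvRank at h; split_ifs at h <;> simp_all

theorem pvRank_eq3 {r : String} (h : pvRank r = 3) : (r == "indirect call (function pointer)") = true := by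
  unfold pvRank at h; split_ifs at h <;> simp_all

-- the fold result is bounded by the initial value
theorem pvFold_le (l : List String) (b : Nat) :
    l.foldl (fun best r => if pvRank r < best then pvRank r else best) b ≤ b := by
  induction l generalizing b with
  | nil => simp
  | cons a l ih =>
    simp only [List.foldl_cons]
    exact le_trans (ih _) (by split_ifs <;> omega)

-- the fold result is ≤ the rank of every member
theorem pvFold_le_of_mem (l : List String) (b : Nat) {r : String} (h : r ∈ l) :
    l.foldl (fun best r => if pvRank r < best then pvRank r else best) b ≤ pvRank r := by
  induction l generalizing b with
  | nil => cases h
  | cons a l ih =>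
    simp only [List.foldl_cons]
    rcases List.mem_cons.mp h with rfl | h'
    · exact le_trans (pvFold_le _ _) (by split_ifs <;> omega)
    · exact ih _ h'

-- the fold result is the initial value or the rank of some member
theorem pvFold_cases (l : List String) (b : Nat) :
    l.foldl (fun best r => if pvRank r < best then pvRank r else best) b = b ∨
      ∃ r ∈ l, l.foldl (fun best r => if pvRank r < best then pvRank r else best) b = pvRank r := by
  induction l generalizing b with
  | nil => exact Or.inl rfl
  | cons a l ih =>
    simp only [List.foldl_cons]
    rcases ih (if pvRank a < b then pvRank a else b) with h | ⟨r, hr, hv⟩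
    · rw [h]; split_ifs with hc
      · exact Or.inr ⟨a, List.mem_cons_self .., rfl⟩
      · exact Or.inl rfl
    · exact Or.inr ⟨r, List.mem_cons_of_mem _ hr, hv⟩

-- ===== VERDICT (by name: the statement is the Claim_ definition above) =====
theorem reason_marker_spec : Claim_equal_reason_marker := by
  intro reasons _
  unfold Spec_reason_marker reason_marker reason_marker_alt
  rw [pvLoop1_eq, pvLoop2_eq, pvLoop3_eq, pvLoop4_eq]
  set m := reasons.foldl (fun best r => if pvRank r < best then pvRank r else best) 4 with hm
  by_cases h0 : reasons.any (fun r => r == "no DWARF data") = true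
  · rcases List.any_eq_true.mp h0 with ⟨r, hr, hc⟩
    have : m ≤ 0 := pvRank_of_c0 hc ▸ pvFold_le_of_mem _ _ hr
    rw [if_pos h0]
    have : m = 0 := by omega
    rw [this]; rfl
  · have hn0 : ¬ ∃ r ∈ reasons, pvRank r = 0 := by
      rintro ⟨r, hr, hv⟩; exact h0 (List.any_eq_true.mpr ⟨r, hr, pvRank_eq0 hv⟩)
    rw [if_neg h0]
    by_cases h1 : reasons.any (fun r => PySem.Str.startswith r "dynamic stack") = true
    · rcases List.any_eq_true.mp h1 with ⟨r, hr, hc⟩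
      have hle : m ≤ 1 := le_trans (pvFold_le_of_mem _ _ hr) (pvRank_of_c1 hc)
      have : m = 1 := by
        rcases pvFold_cases reasons 4 with h | ⟨r', hr', hv⟩
        · omega
        · rcases Nat.lt_or_ge (pvRank r') 1 with hlt | hge
          · exact absurd ⟨r', hr', by omega⟩ hn0
          · rw [← hm] at hv; omega
      rw [if_pos h1, this]; rfl
    · have hn1 : ¬ ∃ r ∈ reasons, pvRank r = 1 := by
        rintro ⟨r, hr, hv⟩; exact h1 (List.any_eq_true.mpr ⟨r, hr, pvRank_eq1 hv⟩)
      rw [if_neg h1]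
      by_cases h2 : reasons.any (fun r => PySem.Str.startswith r "recursion:") = true
      · rcases List.any_eq_true.mp h2 with ⟨r, hr, hc⟩
        have hle : m ≤ 2 := le_trans (pvFold_le_of_mem _ _ hr) (pvRank_of_c2 hc)
        have : m = 2 := by
          rcases pvFold_cases reasons 4 with h | ⟨r', hr', hv⟩
          · omega
          · rw [← hm] at hv
            rcases Nat.lt_or_ge (pvRank r') 2 with hlt | hge
            · interval_cases h : (pvRank r')
              · exact absurd ⟨r', hr', h⟩ hn0
              · exact absurd ⟨r', hr', h⟩ hn1
            · omega
        rw [if_pos h2, this]; rfl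
      · have hn2 : ¬ ∃ r ∈ reasons, pvRank r = 2 := by
          rintro ⟨r, hr, hv⟩; exact h2 (List.any_eq_true.mpr ⟨r, hr, pvRank_eq2 hv⟩)
        rw [if_neg h2]
        by_cases h3 : reasons.any (fun r => r == "indirect call (function pointer)") = true
        · rcases List.any_eq_true.mp h3 with ⟨r, hr, hc⟩
          have hle : m ≤ 3 := le_trans (pvFold_le_of_mem _ _ hr) (pvRank_of_c3 hc)
          have : m = 3 := by
            rcases pvFold_cases reasons 4 with h | ⟨r', hr', hv⟩
            · omega
            · rw [← hm] at hv
              rcases Nat.lt_or_ge (pvRank r') 3 with hlt | hge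
              · interval_cases h : (pvRank r')
                · exact absurd ⟨r', hr', h⟩ hn0
                · exact absurd ⟨r', hr', h⟩ hn1
                · exact absurd ⟨r', hr', h⟩ hn2
              · omega
          rw [if_pos h3, this]; rfl
        · have hn3 : ¬ ∃ r ∈ reasons, pvRank r = 3 := by
            rintro ⟨r, hr, hv⟩; exact h3 (List.any_eq_true.mpr ⟨r, hr, pvRank_eq3 hv⟩)
          rw [if_neg h3]
          have : m = 4 := by
            rcases pvFold_cases reasons 4 with h | ⟨r', hr', hv⟩
            · exact h
            · rw [← hm] at hv
              have h4 := pvRank_le4 r'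
              rcases Nat.lt_or_ge (pvRank r') 4 with hlt | hge
              · interval_cases h : (pvRank r')
                · exact absurd ⟨r', hr', h⟩ hn0
                · exact absurd ⟨r', hr', h⟩ hn1
                · exact absurd ⟨r', hr', h⟩ hn2
                · exact absurd ⟨r', hr', h⟩ hn3
              · omega
          rw [this]; rfl
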